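-- pv_equiv track=rewrite | github.com/jakeo-dev/advent-of-code-2024 | advent-of-code-day-7/part-2.py | getPossibleNumbers
-- ===== SOURCE A (Python) =====
-- def getPossibleNumbers(numbersLength, numPossible):
--     array = []
--
--     # converts each number from 0 to numbersLength to base 3 for the strings of possible combinations
--     for i in range(numPossible):
--         # https://stackoverflow.com/a/34559825
--         nums = []
--         while i:
--             i, r = divmod(i, 3)
--             nums.append(str(r))
--         newNum = str("".join(reversed(nums)))
--
--         if len(newNum) < numbersLength:
--             while len(newNum) < numbersLength:
--                 newNum = "0" + newNum
--         array.append(newNum)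
--
--     return array
-- ===== SOURCE B (Python) =====
-- def getPossibleNumbers(numbersLength, numPossible):
--     # incremental base-3 counter (least-significant digit first) instead of
--     # converting each i independently with divmod
--     def inc(rev_digits):
--         if not rev_digits:
--             return ['1']
--         d, rest = rev_digits[0], rev_digits[1:]
--         if d == '2':
--             return ['0'] + inc(rest)
--         return [chr(ord(d) + 1)] + rest
--
--     if numPossible <= 0:
--         return []
--     result = []
--     rev = ['0'] * max(numbersLength, 0)
--     for _ in range(numPossible):
--         result.append(''.join(reversed(rev)))
--         rev = inc(rev)
--     return result
-- ===== Notes on version B (the rewrite author's own statement) =====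
-- stated objective: alternative
-- what changed: B replaces A's per-index divmod base-3 conversion plus string re-padding with a single incremental base-3 counter (least-significant digit first) that is printed and then incremented with carry propagation once per output string.
import Mathlib
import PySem

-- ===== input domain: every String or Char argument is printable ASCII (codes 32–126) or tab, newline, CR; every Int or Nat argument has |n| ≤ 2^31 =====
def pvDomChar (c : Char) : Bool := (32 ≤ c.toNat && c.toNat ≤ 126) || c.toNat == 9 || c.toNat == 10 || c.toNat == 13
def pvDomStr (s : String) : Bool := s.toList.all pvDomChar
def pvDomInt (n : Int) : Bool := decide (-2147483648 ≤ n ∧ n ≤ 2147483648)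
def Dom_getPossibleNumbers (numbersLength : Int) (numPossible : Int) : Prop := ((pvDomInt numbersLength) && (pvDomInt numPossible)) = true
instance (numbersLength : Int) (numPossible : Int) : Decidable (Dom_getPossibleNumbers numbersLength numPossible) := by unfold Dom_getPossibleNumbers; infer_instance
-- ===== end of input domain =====

-- B replaces A's per-index divmod base-3 conversion with one incremental base-3 counter; proved equal on all inputs.

-- ===== PORT A =====
-- the `while i:` digit loop of A; i comes from range(numPossible), so 0 ≤ i, and on
-- i ≥ 0 Python's divmod(i, 3) is Nat division/remainder — the loop is ported by
-- recursion over Nat, exact on this domain. nums.append(str(r)) builds acc left to right.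
def pvA_numsLoop (i : Nat) (acc : List String) : List String :=
  if h : i = 0 then acc
  else pvA_numsLoop (i / 3) (acc ++ [PySem.Int.toStr ((i % 3 : Nat) : Int)])
  termination_by i
  decreasing_by exact Nat.div_lt_self (Nat.pos_of_ne_zero h) (by omega)

-- `while len(newNum) < numbersLength: newNum = "0" + newNum`; the string prepend is
-- tracked on the character list ('0' :: s.toList), exact for Python string concatenation.
def pvA_pad (numbersLength : Int) (s : String) : String :=
  if PySem.Str.len s < numbersLength then
    pvA_pad numbersLength (String.ofList ('0' :: s.toList))
  else s
  termination_by (numbersLength - PySem.Str.len s).toNat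
  decreasing_by
    have h2 : PySem.Str.len (String.ofList ('0' :: s.toList)) = PySem.Str.len s + 1 := by
      simp [pysem]
    omega

def getPossibleNumbers (numbersLength : Int) (numPossible : Int) : List String :=
  (PySem.List.pyRange 0 numPossible 1).foldl (fun array i =>
    -- i ∈ range(numPossible) is nonnegative, so i.toNat is exact
    let nums := pvA_numsLoop i.toNat []
    let newNum := PySem.Str.join "" nums.reverse
    let newNum := pvA_pad numbersLength newNum
    array ++ [newNum]) []

-- ===== PORT B =====
-- B's recursive increment over the least-significant-digit-first digit list
def pvB_inc : List Char → List Char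
  | [] => ['1']
  | d :: rest => if d = '2' then '0' :: pvB_inc rest else Char.ofNat (d.toNat + 1) :: rest

def getPossibleNumbers_alt (numbersLength : Int) (numPossible : Int) : List String :=
  if numPossible ≤ 0 then [] else
  ((PySem.List.pyRange 0 numPossible 1).foldl
    (fun (st : List String × List Char) _ =>
      (st.1 ++ [String.ofList st.2.reverse], pvB_inc st.2))
    ([], List.replicate (max numbersLength 0).toNat '0')).1

-- ===== PRECONDITION & SPEC =====
def Spec_getPossibleNumbers (numbersLength : Int) (numPossible : Int) (out : List String) : Prop := out = getPossibleNumbers_alt numbersLength numPossible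
instance (numbersLength : Int) (numPossible : Int) (out : List String) : Decidable (Spec_getPossibleNumbers numbersLength numPossible out) := by unfold Spec_getPossibleNumbers; infer_instance

-- ===== CLAIM (what is proved, stated in full; the proofs are below) =====
def Claim_equal_getPossibleNumbers : Prop := ∀ (numbersLength : Int) (numPossible : Int), Dom_getPossibleNumbers numbersLength numPossible → Spec_getPossibleNumbers numbersLength numPossible (getPossibleNumbers numbersLength numPossible)

-- ===== LEMMAS AND PROOFS =====

-- least-significant-first base-3 digits of k ([] for 0)
def pvRev3 (n : Nat) : List Char :=
  if h : n = 0 then []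
  else Nat.digitChar (n % 3) :: pvRev3 (n / 3)
  termination_by n
  decreasing_by exact Nat.div_lt_self (Nat.pos_of_ne_zero h) (by omega)

-- the counter state after k increments from w zeros: digits of k padded to width w, lsd first
def pvCanon (w k : Nat) : List Char := pvRev3 k ++ List.replicate (w - (pvRev3 k).length) '0'

lemma pvRev3_zero : pvRev3 0 = [] := by rw [pvRev3]; simp

lemma pvRev3_pos {n : Nat} (h : n ≠ 0) :
    pvRev3 n = Nat.digitChar (n % 3) :: pvRev3 (n / 3) := by
  rw [pvRev3]; simp [h]

lemma pvCanon_zero (w : Nat) : pvCanon w 0 = List.replicate w '0' := by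
  simp [pvCanon, pvRev3_zero]

lemma pvCanon_pos (w k : Nat) (h : k ≠ 0) :
    pvCanon w k = Nat.digitChar (k % 3) :: pvCanon (w - 1) (k / 3) := by
  unfold pvCanon
  rw [pvRev3_pos h]
  simp only [List.length_cons, List.cons_append, List.cons.injEq, true_and]
  congr 2
  omega

lemma pvB_inc_canon (k : Nat) : ∀ w, pvB_inc (pvCanon w k) = pvCanon w (k + 1) := by
  induction k using Nat.strong_induction_on with
  | _ k ih =>
    intro w
    rcases Nat.eq_zero_or_pos k with hk | hk
    · subst hk
      rw [pvCanon_zero, pvCanon_pos w 1 (by omega)]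
      cases w with
      | zero =>
        simp [pvB_inc, pvCanon, pvRev3_zero]
        decide
      | succ n =>
        rw [List.replicate_succ]
        have : Nat.digitChar (1 % 3) = '1' := by decide
        rw [this]
        simp only [pvB_inc, if_neg (by decide : ¬ ('0' : Char) = '2')]
        have : Char.ofNat ('0'.toNat + 1) = '1' := by decide
        rw [this]
        simp [pvCanon_zero]
    · have hq : k / 3 < k := Nat.div_lt_self hk (by omega)
      rw [pvCanon_pos w k (by omega), pvCanon_pos w (k + 1) (by omega)]
      have hr : k % 3 = 0 ∨ k % 3 = 1 ∨ k % 3 = 2 := by omega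
      rcases hr with h | h | h
      · have h1 : (k + 1) % 3 = 1 := by omega
        have h2 : (k + 1) / 3 = k / 3 := by omega
        rw [h, h1, h2]
        have e0 : Nat.digitChar 0 = '0' := by decide
        rw [e0]
        simp only [pvB_inc, if_neg (by decide : ¬ ('0' : Char) = '2')]
        have : Char.ofNat ('0'.toNat + 1) = Nat.digitChar 1 := by decide
        rw [this]
      · have h1 : (k + 1) % 3 = 2 := by omega
        have h2 : (k + 1) / 3 = k / 3 := by omega
        rw [h, h1, h2]
        have e1 : Nat.digitChar 1 = '1' := by decide
        rw [e1]
        simp only [pvB_inc, if_neg (by decide : ¬ ('1' : Char) = '2')]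
        have : Char.ofNat ('1'.toNat + 1) = Nat.digitChar 2 := by decide
        rw [this]
      · have h1 : (k + 1) % 3 = 0 := by omega
        have h2 : (k + 1) / 3 = k / 3 + 1 := by omega
        rw [h, h1, h2]
        have e2 : Nat.digitChar 2 = '2' := by decide
        have e0 : Nat.digitChar 0 = '0' := by decide
        rw [e2, e0]
        simp [pvB_inc, ih (k / 3) hq (w - 1)]

lemma pvB_fold (n w : Nat) :
    (PySem.List.pyRange 0 (n : Int) 1).foldl
      (fun (st : List String × List Char) _ =>
        (st.1 ++ [String.ofList st.2.reverse], pvB_inc st.2))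
      ([], pvCanon w 0)
    = ((List.range n).map (fun k => String.ofList (pvCanon w k).reverse), pvCanon w n) := by
  induction n with
  | zero => simp [PySem.List.pyRange_one_eq_nil (by omega : (0:Int) ≤ 0)]
  | succ n ih =>
    have hc : ((n + 1 : Nat) : Int) = (n : Int) + 1 := by push_cast; ring
    rw [hc, PySem.List.pyRange_one_succ_right (by omega : (0:Int) ≤ (n : Int)), List.foldl_append, ih]
    simp [List.range_succ, pvB_inc_canon]

lemma pv_toStr_digit (r : Nat) (h : r < 3) :
    PySem.Int.toStr (r : Int) = String.ofList [Nat.digitChar r] := by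
  interval_cases r <;> decide

lemma pvA_numsLoop_eq (k : Nat) : ∀ acc,
    pvA_numsLoop k acc = acc ++ (pvRev3 k).map (fun c => String.ofList [c]) := by
  induction k using Nat.strong_induction_on with
  | _ k ih =>
    intro acc
    rcases Nat.eq_zero_or_pos k with hk | hk
    · subst hk
      rw [pvA_numsLoop]
      simp [pvRev3_zero]
    · rw [pvA_numsLoop, dif_neg (by omega : ¬ k = 0)]
      rw [ih (k / 3) (Nat.div_lt_self hk (by omega))]
      rw [pvRev3_pos (by omega : k ≠ 0)]
      rw [pv_toStr_digit (k % 3) (by omega)]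
      simp

lemma pv_intercalate_nil : ∀ (ls : List (List Char)), ([] : List Char).intercalate ls = ls.flatten
  | [] => rfl
  | [_] => by simp [List.intercalate]
  | x :: y :: ls => by
      have ih := pv_intercalate_nil (y :: ls)
      simp [List.intercalate] at ih ⊢
      simpa using ih

lemma pv_flatten_singletons (cs : List Char) : (cs.map (fun c => [c])).flatten = cs := by
  induction cs with
  | nil => rfl
  | cons c cs ih => simp [ih]

lemma pv_join_chars (cs : List Char) :
    PySem.Str.join "" (cs.map (fun c => String.ofList [c])) = String.ofList cs := by
  refine String.toList_inj.mp ?_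
  simp only [PySem.Str.join, List.map_map, String.toList_ofList]
  have h1 : List.map (String.toList ∘ fun c => String.ofList [c]) cs = cs.map (fun c => [c]) := by
    simp [Function.comp_def]
  rw [h1]
  simp only [PySem.Chars.join]
  have h0 : ("" : String).toList = ([] : List Char) := by simp
  rw [h0, pv_intercalate_nil, pv_flatten_singletons]

lemma pvA_pad_eq (nL : Int) (s : String) :
    pvA_pad nL s = String.ofList (List.replicate (nL.toNat - s.toList.length) '0' ++ s.toList) := by
  suffices H : ∀ m (s : String), nL.toNat - s.toList.length = m →
      pvA_pad nL s = String.ofList (List.replicate (nL.toNat - s.toList.length) '0' ++ s.toList) from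
    H _ s rfl
  intro m
  induction m with
  | zero =>
    intro s h
    have hl : s.toList.length = s.length := by simp
    rw [pvA_pad, if_neg]
    · rw [h]; simp
    · simp [pysem]
      omega
  | succ m ih =>
    intro s h
    have hl : s.toList.length = s.length := by simp
    rw [pvA_pad, if_pos (by simp [pysem]; omega)]
    rw [ih (String.ofList ('0' :: s.toList)) (by simp; omega)]
    simp only [String.toList_ofList]
    have hc : nL.toNat - s.toList.length = (nL.toNat - ('0' :: s.toList).length) + 1 := by
      simp only [List.length_cons]; omega
    rw [hc, List.replicate_succ']
    simp

lemma pvA_entry (nL : Int) (k : Nat) :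
    pvA_pad nL (PySem.Str.join "" (pvA_numsLoop k []).reverse)
      = String.ofList (pvCanon nL.toNat k).reverse := by
  rw [pvA_numsLoop_eq k []]
  simp only [List.nil_append, ← List.map_reverse]
  rw [pv_join_chars, pvA_pad_eq]
  congr 1
  simp [pvCanon, List.reverse_append, List.reverse_replicate]

-- ===== VERDICT (by name: the statement is the Claim_ definition above) =====
theorem getPossibleNumbers_spec : Claim_equal_getPossibleNumbers := by
  intro nL nP _
  unfold Spec_getPossibleNumbers getPossibleNumbers getPossibleNumbers_alt
  by_cases h : nP ≤ 0
  · rw [if_pos h, PySem.List.pyRange_one_eq_nil h]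
    simp
  · rw [if_neg h]
    have hn : nP = ((nP.toNat : Nat) : Int) := by omega
    have hw : (max nL 0).toNat = nL.toNat := by omega
    rw [hw, hn, ← pvCanon_zero, pvB_fold]
    rw [PySem.List.pyRange_one]
    simp only [sub_zero, Int.toNat_natCast, PySem.List.foldl_append_singleton_eq_map,
      List.map_map]
    apply List.map_congr_left
    intro k _
    simp only [Function.comp, zero_add, Int.toNat_natCast]
    exact pvA_entry nL k
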